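-- pv_equiv track=rewrite | github.com/debruijn/adventofcode | 2021/aoc_22.py | count_uninterrupted
-- ===== SOURCE A (Python) =====
-- def get_overlap(this, other):
--     if this[-1] < other[0] or this[0] > other[-1]:
--         return []
--     else:
--         return range(max(this[0], other[0]), min(this[-1], other[-1])+1)
--
-- def count_uninterrupted(item, rest):
--     _, xr, yr, zr = item
--     total = len(xr) * len(yr) * len(zr)
--
--     conflicts = []
--
--     # For each future item, find overlapping region, add these to conflicts
--     for item in rest:
--         state, xr2, yr2, zr2 = item
--
--         cxr = get_overlap(xr2, xr)
--         cyr = get_overlap(yr2, yr)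
--         czr = get_overlap(zr2, zr)
--
--         if len(cxr) == 0 or len(cyr) == 0 or len(czr) == 0:
--             continue
--
--         conflicts.append((state, cxr, cyr, czr))
--
--     # If there are conflicts, subtract their counts from the current ones
--     #  - Because no matter what you do right now, it will be overwritten by a future command
--     #  - Take conflicts in the conflicts into account, so rerun this function to do that in negative space
--     for idx, item in enumerate(conflicts):
--         total -= count_uninterrupted(item, conflicts[idx + 1:])
--
--     return total
-- ===== SOURCE B (Python) =====
-- def count_uninterrupted(item, rest):
--     # Coordinate compression: subtract the volume of the union of the later
--     # boxes clipped to this item's box, counted block by block.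
--     _, xr, yr, zr = item
--     total = len(xr) * len(yr) * len(zr)
--
--     # Clip each later box to this item's bounding box; keep non-empty clips.
--     boxes = []
--     for _, xr2, yr2, zr2 in rest:
--         lx, hx = max(xr2[0], xr[0]), min(xr2[-1], xr[-1])
--         ly, hy = max(yr2[0], yr[0]), min(yr2[-1], yr[-1])
--         lz, hz = max(zr2[0], zr[0]), min(zr2[-1], zr[-1])
--         if lx <= hx and ly <= hy and lz <= hz:
--             boxes.append((lx, hx, ly, hy, lz, hz))
--
--     # Distinct boundaries per axis; half-open cell blocks between neighbours.
--     xs = sorted({v for b in boxes for v in (b[0], b[1] + 1)})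
--     ys = sorted({v for b in boxes for v in (b[2], b[3] + 1)})
--     zs = sorted({v for b in boxes for v in (b[4], b[5] + 1)})
--
--     covered = 0
--     for i in range(len(xs) - 1):
--         for j in range(len(ys) - 1):
--             for k in range(len(zs) - 1):
--                 if any(b[0] <= xs[i] <= b[1] and b[2] <= ys[j] <= b[3]
--                        and b[4] <= zs[k] <= b[5] for b in boxes):
--                     covered += (xs[i + 1] - xs[i]) * (ys[j + 1] - ys[j]) * (zs[k + 1] - zs[k])
--
--     return total - covered
-- ===== Notes on version B (the rewrite author's own statement) =====
-- stated objective: faster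
-- what changed: Replaces A's exponential inclusion-exclusion recursion (each conflict recursively re-subtracts its own conflicts) by coordinate compression: clip every later box to the item's box once, collect the distinct boundary values per axis, and add up the whole cell blocks whose representative corner is covered by some clipped box.
import Mathlib
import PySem

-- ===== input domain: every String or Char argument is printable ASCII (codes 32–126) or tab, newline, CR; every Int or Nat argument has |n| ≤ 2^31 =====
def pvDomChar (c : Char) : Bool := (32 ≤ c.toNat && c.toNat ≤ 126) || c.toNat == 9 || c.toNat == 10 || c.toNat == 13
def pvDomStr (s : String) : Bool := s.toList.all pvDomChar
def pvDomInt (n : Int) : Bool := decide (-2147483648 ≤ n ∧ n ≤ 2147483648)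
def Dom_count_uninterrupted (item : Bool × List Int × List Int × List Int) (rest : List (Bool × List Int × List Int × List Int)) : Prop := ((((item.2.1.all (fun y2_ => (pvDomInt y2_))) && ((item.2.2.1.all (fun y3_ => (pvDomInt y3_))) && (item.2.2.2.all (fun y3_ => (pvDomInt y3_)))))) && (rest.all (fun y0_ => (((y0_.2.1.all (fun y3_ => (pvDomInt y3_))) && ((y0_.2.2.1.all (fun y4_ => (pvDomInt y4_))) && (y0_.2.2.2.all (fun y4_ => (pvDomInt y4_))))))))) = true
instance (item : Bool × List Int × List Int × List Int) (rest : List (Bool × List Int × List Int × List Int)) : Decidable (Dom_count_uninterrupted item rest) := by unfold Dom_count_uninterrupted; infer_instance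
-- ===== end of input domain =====

-- B replaces A's exponential inclusion–exclusion recursion by coordinate compression over the
-- clipped boxes (count whole cell blocks between distinct boundaries); objective: faster.

-- shared subscript helper: xs[i] (Python raises on an out-of-range index; Pre_ excludes that)
def pvIx (l : List Int) (i : Int) : Int := PySem.List.pyGetD l i 0

-- ===== PORT A =====
def get_overlap (this other : List Int) : List Int :=
  if pvIx this (-1) < pvIx other 0 ∨ pvIx this 0 > pvIx other (-1) then []
  else PySem.List.pyRange (max (pvIx this 0) (pvIx other 0))
        (min (pvIx this (-1)) (pvIx other (-1)) + 1) 1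

-- A's first loop: collect the (state, cxr, cyr, czr) conflicts, skipping empty overlaps
def buildConflicts (xr yr zr : List Int) :
    List (Bool × List Int × List Int × List Int) → List (Bool × List Int × List Int × List Int)
  | [] => []
  | (state, xr2, yr2, zr2) :: rs =>
    let cxr := get_overlap xr2 xr
    let cyr := get_overlap yr2 yr
    let czr := get_overlap zr2 zr
    if cxr.length = 0 ∨ cyr.length = 0 ∨ czr.length = 0 then buildConflicts xr yr zr rs
    else (state, cxr, cyr, czr) :: buildConflicts xr yr zr rs

-- needed by the termination argument of the mutual recursion below
theorem buildConflicts_length_le (xr yr zr : List Int)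
    (rs : List (Bool × List Int × List Int × List Int)) :
    (buildConflicts xr yr zr rs).length ≤ rs.length := by
  induction rs with
  | nil => simp [buildConflicts]
  | cons r rs ih =>
    obtain ⟨st, a, b, c⟩ := r
    simp only [buildConflicts]
    split
    · simpa using Nat.le_succ_of_le ih
    · simpa using ih

mutual
-- A's second loop: total -= count_uninterrupted(conflicts[idx], conflicts[idx+1:])
def count_uninterrupted (item : Bool × List Int × List Int × List Int)
    (rest : List (Bool × List Int × List Int × List Int)) : Int :=
  let total : Int := (item.2.1.length : Int) * (item.2.2.1.length : Int) * (item.2.2.2.length : Int)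
  total - pvSumConf (buildConflicts item.2.1 item.2.2.1 item.2.2.2 rest)
termination_by 2 * rest.length + 1
decreasing_by
  have h := buildConflicts_length_le item.2.1 item.2.2.1 item.2.2.2 rest
  omega

def pvSumConf : List (Bool × List Int × List Int × List Int) → Int
  | [] => 0
  | c :: cs => count_uninterrupted c cs + pvSumConf cs
termination_by L => 2 * L.length
decreasing_by
  all_goals simp only [List.length_cons]; omega
end

-- ===== PORT B =====
-- clip each later box to this item's bounding box, keep the non-empty clips
def pvClip (xr yr zr : List Int) :
    List (Bool × List Int × List Int × List Int) → List (Int × Int × Int × Int × Int × Int)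
  | [] => []
  | (_, xr2, yr2, zr2) :: rs =>
    let lx := max (pvIx xr2 0) (pvIx xr 0)
    let hx := min (pvIx xr2 (-1)) (pvIx xr (-1))
    let ly := max (pvIx yr2 0) (pvIx yr 0)
    let hy := min (pvIx yr2 (-1)) (pvIx yr (-1))
    let lz := max (pvIx zr2 0) (pvIx zr 0)
    let hz := min (pvIx zr2 (-1)) (pvIx zr (-1))
    if lx ≤ hx ∧ ly ≤ hy ∧ lz ≤ hz then (lx, hx, ly, hy, lz, hz) :: pvClip xr yr zr rs
    else pvClip xr yr zr rs

-- sorted({v for b in boxes for v in (lo b, hi b + 1)})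
def pvBounds (f g : (Int × Int × Int × Int × Int × Int) → Int)
    (boxes : List (Int × Int × Int × Int × Int × Int)) : List Int :=
  PySem.List.sorted (PySem.Set.ofList (boxes.flatMap fun b => [f b, g b + 1])) (fun v => v) false

-- any(b covers (x, y, z) for b in boxes)
def pvAnyCover (boxes : List (Int × Int × Int × Int × Int × Int)) (x y z : Int) : Bool :=
  boxes.any fun b =>
    decide (b.1 ≤ x) && decide (x ≤ b.2.1) && decide (b.2.2.1 ≤ y) && decide (y ≤ b.2.2.2.1) &&
    decide (b.2.2.2.2.1 ≤ z) && decide (z ≤ b.2.2.2.2.2)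

def count_uninterrupted_alt (item : Bool × List Int × List Int × List Int)
    (rest : List (Bool × List Int × List Int × List Int)) : Int :=
  let total : Int := (item.2.1.length : Int) * (item.2.2.1.length : Int) * (item.2.2.2.length : Int)
  let boxes := pvClip item.2.1 item.2.2.1 item.2.2.2 rest
  let xs := pvBounds (fun b => b.1) (fun b => b.2.1) boxes
  let ys := pvBounds (fun b => b.2.2.1) (fun b => b.2.2.2.1) boxes
  let zs := pvBounds (fun b => b.2.2.2.2.1) (fun b => b.2.2.2.2.2) boxes
  let covered :=
    (PySem.List.pyRange 0 ((xs.length : Int) - 1) 1).foldl (fun acc i =>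
      (PySem.List.pyRange 0 ((ys.length : Int) - 1) 1).foldl (fun acc j =>
        (PySem.List.pyRange 0 ((zs.length : Int) - 1) 1).foldl (fun acc k =>
          if pvAnyCover boxes (pvIx xs i) (pvIx ys j) (pvIx zs k) then
            acc + (pvIx xs (i + 1) - pvIx xs i) * (pvIx ys (j + 1) - pvIx ys j) *
              (pvIx zs (k + 1) - pvIx zs k)
          else acc) acc) acc) 0
  total - covered

-- ===== PRECONDITION & SPEC =====
-- Pre_ excludes exactly the inputs on which Python A raises IndexError: when rest is non-empty
-- A reads l[0] and l[-1] of every coordinate list (item's and rest's), so an empty one raises;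
-- with rest = [] nothing is indexed and A returns on any item.
def Pre_count_uninterrupted (item : Bool × List Int × List Int × List Int)
    (rest : List (Bool × List Int × List Int × List Int)) : Prop :=
  rest = [] ∨
    (item.2.1 ≠ [] ∧ item.2.2.1 ≠ [] ∧ item.2.2.2 ≠ [] ∧
      ∀ r ∈ rest, r.2.1 ≠ [] ∧ r.2.2.1 ≠ [] ∧ r.2.2.2 ≠ [])
instance (item : Bool × List Int × List Int × List Int) (rest : List (Bool × List Int × List Int × List Int)) : Decidable (Pre_count_uninterrupted item rest) := by unfold Pre_count_uninterrupted; infer_instance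

def pvWitness_count_uninterrupted :
    (Bool × List Int × List Int × List Int) × (List (Bool × List Int × List Int × List Int)) :=
  ((true, [0, 1, 2], [0, 1], [0]), [(false, [1, 2], [0, 1], [0]), (true, [2], [1], [0])])

def Spec_count_uninterrupted (item : Bool × List Int × List Int × List Int) (rest : List (Bool × List Int × List Int × List Int)) (out : Int) : Prop := out = count_uninterrupted_alt item rest
instance (item : Bool × List Int × List Int × List Int) (rest : List (Bool × List Int × List Int × List Int)) (out : Int) : Decidable (Spec_count_uninterrupted item rest out) := by unfold Spec_count_uninterrupted; infer_instance

-- ===== CLAIM (what is proved, stated in full; the proofs are below) =====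
def Claim_equal_count_uninterrupted : Prop := ∀ (item : Bool × List Int × List Int × List Int) (rest : List (Bool × List Int × List Int × List Int)), Dom_count_uninterrupted item rest → Pre_count_uninterrupted item rest → Spec_count_uninterrupted item rest (count_uninterrupted item rest)

-- ===== LEMMAS AND PROOFS =====

-- the set of integer points of a box (lx, hx, ly, hy, lz, hz)
noncomputable def pvGrid (b : Int × Int × Int × Int × Int × Int) : Finset (ℤ × ℤ × ℤ) :=
  Finset.Icc b.1 b.2.1 ×ˢ (Finset.Icc b.2.2.1 b.2.2.2.1 ×ˢ Finset.Icc b.2.2.2.2.1 b.2.2.2.2.2)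

noncomputable def pvUnion (L : List (Int × Int × Int × Int × Int × Int)) : Finset (ℤ × ℤ × ℤ) :=
  L.foldr (fun b s => pvGrid b ∪ s) ∅

def pvItemBox (r : Bool × List Int × List Int × List Int) : Int × Int × Int × Int × Int × Int :=
  (pvIx r.2.1 0, pvIx r.2.1 (-1), pvIx r.2.2.1 0, pvIx r.2.2.1 (-1), pvIx r.2.2.2 0, pvIx r.2.2.2 (-1))

def pvRangeItem (c : Bool × List Int × List Int × List Int) : Prop :=
  ∃ lx hx ly hy lz hz : Int, lx ≤ hx ∧ ly ≤ hy ∧ lz ≤ hz ∧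
    c.2.1 = PySem.List.pyRange lx (hx + 1) 1 ∧
    c.2.2.1 = PySem.List.pyRange ly (hy + 1) 1 ∧
    c.2.2.2 = PySem.List.pyRange lz (hz + 1) 1

theorem pvIx_range_zero (lo hi : ℤ) (h : lo ≤ hi) :
    pvIx (PySem.List.pyRange lo (hi + 1) 1) 0 = lo := by
  rw [pvIx, PySem.List.pyRange_one_cons (by omega)]
  simp [PySem.List.pyGetD_zero]


theorem pvIx_range_last (lo hi : ℤ) (h : lo ≤ hi) :
    pvIx (PySem.List.pyRange lo (hi + 1) 1) (-1) = hi := by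
  rw [pvIx, PySem.List.pyRange_one_succ_right (by omega),
    PySem.List.pyGetD_neg_one_append_singleton]


theorem pvRange_len_int (lo hi : ℤ) (h : lo ≤ hi) :
    ((PySem.List.pyRange lo (hi + 1) 1).length : ℤ) = hi + 1 - lo := by
  rw [PySem.List.length_pyRange_one]; omega


theorem pvOverlap_len_zero_iff (t o : List Int) :
    (get_overlap t o).length = 0 ↔
      min (pvIx t (-1)) (pvIx o (-1)) < max (pvIx t 0) (pvIx o 0) := by
  rw [get_overlap]
  split_ifs with hc
  · simp only [List.length_nil, true_iff]
    rcases hc with h | h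
    · exact lt_of_le_of_lt (min_le_left _ _) (lt_of_lt_of_le h (le_max_right _ _))
    · exact lt_of_le_of_lt (min_le_right _ _) (lt_of_lt_of_le h (le_max_left _ _))
  · rw [PySem.List.length_pyRange_one]; omega


theorem pvOverlap_eq (t o : List Int)
    (h : max (pvIx t 0) (pvIx o 0) ≤ min (pvIx t (-1)) (pvIx o (-1))) :
    get_overlap t o =
      PySem.List.pyRange (max (pvIx t 0) (pvIx o 0)) (min (pvIx t (-1)) (pvIx o (-1)) + 1) 1 := by
  rw [get_overlap]
  split_ifs with hc
  · exfalso
    rcases hc with h' | h'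
    · have h1 := min_le_left (pvIx t (-1)) (pvIx o (-1))
      have h2 := le_max_right (pvIx t 0) (pvIx o 0)
      omega
    · have h1 := min_le_right (pvIx t (-1)) (pvIx o (-1))
      have h2 := le_max_left (pvIx t 0) (pvIx o 0)
      omega
  · rfl


theorem mem_pvUnion (L : List (Int × Int × Int × Int × Int × Int)) (p : ℤ × ℤ × ℤ) :
    p ∈ pvUnion L ↔ ∃ b ∈ L, p ∈ pvGrid b := by
  induction L with
  | nil => simp [pvUnion]
  | cons b bs ih => simp [pvUnion] at ih ⊢; rw [ih]


theorem pvIcc_inter (a b c d : ℤ) :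
    Finset.Icc a b ∩ Finset.Icc c d = Finset.Icc (max a c) (min b d) := by
  ext x; simp [Finset.mem_inter, Finset.mem_Icc]; omega

theorem pvGrid_inter (b1 b2 : Int × Int × Int × Int × Int × Int) :
    pvGrid b1 ∩ pvGrid b2 =
      pvGrid (max b1.1 b2.1, min b1.2.1 b2.2.1, max b1.2.2.1 b2.2.2.1, min b1.2.2.2.1 b2.2.2.2.1,
        max b1.2.2.2.2.1 b2.2.2.2.2.1, min b1.2.2.2.2.2 b2.2.2.2.2.2) := by
  simp [pvGrid, Finset.product_inter_product, pvIcc_inter]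

theorem pvGrid_empty (b : Int × Int × Int × Int × Int × Int)
    (h : b.2.1 < b.1 ∨ b.2.2.2.1 < b.2.2.1 ∨ b.2.2.2.2.2 < b.2.2.2.2.1) : pvGrid b = ∅ := by
  rcases h with h | h | h <;>
    simp [pvGrid, Finset.Icc_eq_empty_of_lt h]


theorem pvSkip_iff (xr2 xr yr2 yr zr2 zr : List Int) :
    ((get_overlap xr2 xr).length = 0 ∨ (get_overlap yr2 yr).length = 0 ∨
      (get_overlap zr2 zr).length = 0) ↔
    ¬(max (pvIx xr2 0) (pvIx xr 0) ≤ min (pvIx xr2 (-1)) (pvIx xr (-1)) ∧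
      max (pvIx yr2 0) (pvIx yr 0) ≤ min (pvIx yr2 (-1)) (pvIx yr (-1)) ∧
      max (pvIx zr2 0) (pvIx zr 0) ≤ min (pvIx zr2 (-1)) (pvIx zr (-1))) := by
  rw [pvOverlap_len_zero_iff, pvOverlap_len_zero_iff, pvOverlap_len_zero_iff]
  omega

theorem pvConflictBox (xr2 xr yr2 yr zr2 zr : List Int) (st : Bool)
    (h1 : max (pvIx xr2 0) (pvIx xr 0) ≤ min (pvIx xr2 (-1)) (pvIx xr (-1)))
    (h2 : max (pvIx yr2 0) (pvIx yr 0) ≤ min (pvIx yr2 (-1)) (pvIx yr (-1)))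
    (h3 : max (pvIx zr2 0) (pvIx zr 0) ≤ min (pvIx zr2 (-1)) (pvIx zr (-1))) :
    pvItemBox (st, get_overlap xr2 xr, get_overlap yr2 yr, get_overlap zr2 zr) =
      (max (pvIx xr2 0) (pvIx xr 0), min (pvIx xr2 (-1)) (pvIx xr (-1)),
       max (pvIx yr2 0) (pvIx yr 0), min (pvIx yr2 (-1)) (pvIx yr (-1)),
       max (pvIx zr2 0) (pvIx zr 0), min (pvIx zr2 (-1)) (pvIx zr (-1))) := by
  rw [pvItemBox]
  simp only [pvOverlap_eq xr2 xr h1, pvOverlap_eq yr2 yr h2, pvOverlap_eq zr2 zr h3]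
  rw [pvIx_range_zero _ _ h1, pvIx_range_last _ _ h1, pvIx_range_zero _ _ h2,
    pvIx_range_last _ _ h2, pvIx_range_zero _ _ h3, pvIx_range_last _ _ h3]

theorem buildConflicts_map_eq_clip (xr yr zr : List Int)
    (rs : List (Bool × List Int × List Int × List Int)) :
    (buildConflicts xr yr zr rs).map pvItemBox = pvClip xr yr zr rs := by
  induction rs with
  | nil => rfl
  | cons r rs ih =>
    obtain ⟨st, xr2, yr2, zr2⟩ := r
    simp only [buildConflicts, pvClip]
    by_cases hk : max (pvIx xr2 0) (pvIx xr 0) ≤ min (pvIx xr2 (-1)) (pvIx xr (-1)) ∧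
        max (pvIx yr2 0) (pvIx yr 0) ≤ min (pvIx yr2 (-1)) (pvIx yr (-1)) ∧
        max (pvIx zr2 0) (pvIx zr 0) ≤ min (pvIx zr2 (-1)) (pvIx zr (-1))
    · rw [if_neg (fun hskip => ((pvSkip_iff xr2 xr yr2 yr zr2 zr).mp hskip) hk), if_pos hk]
      rw [List.map_cons, ih, pvConflictBox xr2 xr yr2 yr zr2 zr st hk.1 hk.2.1 hk.2.2]
    · rw [if_pos ((pvSkip_iff xr2 xr yr2 yr zr2 zr).mpr hk), if_neg hk]
      exact ih


theorem buildConflicts_rangeItem (xr yr zr : List Int)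
    (rs : List (Bool × List Int × List Int × List Int)) :
    ∀ c ∈ buildConflicts xr yr zr rs, pvRangeItem c := by
  induction rs with
  | nil => intro c hc; simp [buildConflicts] at hc
  | cons r rs ih =>
    obtain ⟨st, xr2, yr2, zr2⟩ := r
    intro c hc
    simp only [buildConflicts] at hc
    by_cases hk : max (pvIx xr2 0) (pvIx xr 0) ≤ min (pvIx xr2 (-1)) (pvIx xr (-1)) ∧
        max (pvIx yr2 0) (pvIx yr 0) ≤ min (pvIx yr2 (-1)) (pvIx yr (-1)) ∧
        max (pvIx zr2 0) (pvIx zr 0) ≤ min (pvIx zr2 (-1)) (pvIx zr (-1))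
    · rw [if_neg (fun hskip => ((pvSkip_iff xr2 xr yr2 yr zr2 zr).mp hskip) hk)] at hc
      rcases List.mem_cons.mp hc with rfl | hc
      · refine ⟨_, _, _, _, _, _, hk.1, hk.2.1, hk.2.2, ?_, ?_, ?_⟩ <;>
          simp only [pvOverlap_eq xr2 xr hk.1, pvOverlap_eq yr2 yr hk.2.1,
            pvOverlap_eq zr2 zr hk.2.2]
      · exact ih c hc
    · rw [if_pos ((pvSkip_iff xr2 xr yr2 yr zr2 zr).mpr hk)] at hc
      exact ih c hc


theorem pvUnion_buildConflicts (xr yr zr : List Int)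
    (rs : List (Bool × List Int × List Int × List Int)) :
    pvUnion ((buildConflicts xr yr zr rs).map pvItemBox) =
      pvGrid (pvItemBox (true, xr, yr, zr)) ∩ pvUnion (rs.map pvItemBox) := by
  induction rs with
  | nil => simp [buildConflicts, pvUnion]
  | cons r rs ih =>
    obtain ⟨st, xr2, yr2, zr2⟩ := r
    simp only [buildConflicts]
    have hcons : ∀ (b : Int × Int × Int × Int × Int × Int) (l : List _),
        pvUnion (b :: l) = pvGrid b ∪ pvUnion l := fun _ _ => rfl
    by_cases hk : max (pvIx xr2 0) (pvIx xr 0) ≤ min (pvIx xr2 (-1)) (pvIx xr (-1)) ∧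
        max (pvIx yr2 0) (pvIx yr 0) ≤ min (pvIx yr2 (-1)) (pvIx yr (-1)) ∧
        max (pvIx zr2 0) (pvIx zr 0) ≤ min (pvIx zr2 (-1)) (pvIx zr (-1))
    · rw [if_neg (fun hskip => ((pvSkip_iff xr2 xr yr2 yr zr2 zr).mp hskip) hk)]
      rw [List.map_cons, hcons, ih, List.map_cons, hcons,
        pvConflictBox xr2 xr yr2 yr zr2 zr st hk.1 hk.2.1 hk.2.2,
        Finset.inter_union_distrib_left]
      congr 1
      rw [pvGrid_inter]
      simp only [pvItemBox]
      rw [max_comm (pvIx xr 0) (pvIx xr2 0), min_comm (pvIx xr (-1)) (pvIx xr2 (-1)),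
        max_comm (pvIx yr 0) (pvIx yr2 0), min_comm (pvIx yr (-1)) (pvIx yr2 (-1)),
        max_comm (pvIx zr 0) (pvIx zr2 0), min_comm (pvIx zr (-1)) (pvIx zr2 (-1))]
    · rw [if_pos ((pvSkip_iff xr2 xr yr2 yr zr2 zr).mpr hk)]
      rw [ih, List.map_cons, hcons, Finset.inter_union_distrib_left]
      have hempty : pvGrid (pvItemBox (true, xr, yr, zr)) ∩
          pvGrid (pvItemBox (st, xr2, yr2, zr2)) = ∅ := by
        rw [pvGrid_inter]
        apply pvGrid_empty
        simp only [pvItemBox]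
        have := (pvSkip_iff xr2 xr yr2 yr zr2 zr).mpr hk
        rcases this with h | h | h
        all_goals rw [pvOverlap_len_zero_iff] at h
        · left; omega
        · right; left; omega
        · right; right; omega
      rw [hempty, Finset.empty_union]


theorem pvCard_grid_of_rangeItem (c : Bool × List Int × List Int × List Int)
    (h : pvRangeItem c) :
    (c.2.1.length : ℤ) * (c.2.2.1.length : ℤ) * (c.2.2.2.length : ℤ) =
      ((pvGrid (pvItemBox c)).card : ℤ) := by
  obtain ⟨lx, hx, ly, hy, lz, hz, h1, h2, h3, e1, e2, e3⟩ := h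
  rw [pvItemBox, e1, e2, e3]
  rw [pvIx_range_zero _ _ h1, pvIx_range_last _ _ h1, pvIx_range_zero _ _ h2,
    pvIx_range_last _ _ h2, pvIx_range_zero _ _ h3, pvIx_range_last _ _ h3]
  rw [pvRange_len_int _ _ h1, pvRange_len_int _ _ h2, pvRange_len_int _ _ h3]
  rw [pvGrid]
  simp only [Finset.card_product, Int.card_Icc]
  push_cast
  rw [Int.toNat_of_nonneg (by omega), Int.toNat_of_nonneg (by omega),
    Int.toNat_of_nonneg (by omega)]
  ring


-- the main characterisation of A's recursion
theorem pvMain (n : ℕ) :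
    (∀ item rest, rest.length ≤ n →
      count_uninterrupted item rest =
        (item.2.1.length : ℤ) * (item.2.2.1.length : ℤ) * (item.2.2.2.length : ℤ) -
          ((pvUnion ((buildConflicts item.2.1 item.2.2.1 item.2.2.2 rest).map pvItemBox)).card : ℤ)) ∧
    (∀ L : List (Bool × List Int × List Int × List Int), L.length ≤ n →
      (∀ c ∈ L, pvRangeItem c) →
      pvSumConf L = ((pvUnion (L.map pvItemBox)).card : ℤ)) := by
  induction n with
  | zero =>
    constructor
    · intro item rest hlen
      have hnil : rest = [] := List.eq_nil_of_length_eq_zero (by omega)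
      subst hnil
      rw [count_uninterrupted]
      simp [buildConflicts, pvUnion, pvSumConf]
    · intro L hlen _
      have hnil : L = [] := List.eq_nil_of_length_eq_zero (by omega)
      subst hnil
      simp [pvSumConf, pvUnion]
  | succ n ih =>
    have hcons : ∀ (b : Int × Int × Int × Int × Int × Int) (l : List _),
        pvUnion (b :: l) = pvGrid b ∪ pvUnion l := fun _ _ => rfl
    have hP2 : ∀ L : List (Bool × List Int × List Int × List Int), L.length ≤ n + 1 →
        (∀ c ∈ L, pvRangeItem c) →
        pvSumConf L = ((pvUnion (L.map pvItemBox)).card : ℤ) := by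
      intro L hlen hri
      match L with
      | [] => simp [pvSumConf, pvUnion]
      | c :: cs =>
        rw [pvSumConf]
        have hlcs : cs.length ≤ n := by simpa using hlen
        rw [ih.1 c cs hlcs, ih.2 cs hlcs (fun d hd => hri d (List.mem_cons_of_mem c hd))]
        rw [pvUnion_buildConflicts]
        have hbox : pvItemBox (true, c.2.1, c.2.2.1, c.2.2.2) = pvItemBox c := rfl
        rw [hbox, pvCard_grid_of_rangeItem c (hri c List.mem_cons_self)]
        rw [List.map_cons, hcons]
        have hcard := Finset.card_union_add_card_inter (pvGrid (pvItemBox c))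
          (pvUnion (cs.map pvItemBox))
        have hsub : ((pvGrid (pvItemBox c)) ∩ (pvUnion (cs.map pvItemBox))).card ≤
            (pvGrid (pvItemBox c)).card :=
          Finset.card_le_card Finset.inter_subset_left
        omega
    refine ⟨?_, hP2⟩
    intro item rest hlen
    rw [count_uninterrupted]
    rw [hP2 (buildConflicts item.2.1 item.2.2.1 item.2.2.2 rest)
      (le_trans (buildConflicts_length_le _ _ _ _) hlen)
      (buildConflicts_rangeItem _ _ _ _)]


-- ==== 1D grid lemmas ====

theorem pvGetD_strict (xs : List Int) (hs : xs.Pairwise (· < ·)) (i j : ℕ)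
    (hij : i < j) (hj : j < xs.length) : xs.getD i 0 < xs.getD j 0 := by
  have hi : i < xs.length := lt_trans hij hj
  rw [List.getD_eq_getElem xs 0 hi, List.getD_eq_getElem xs 0 hj]
  exact List.pairwise_iff_getElem.mp hs i j hi hj hij


theorem pvGetD_mono (xs : List Int) (hs : xs.Pairwise (· < ·)) (i j : ℕ)
    (hij : i ≤ j) (hj : j < xs.length) : xs.getD i 0 ≤ xs.getD j 0 := by
  rcases Nat.lt_or_ge i j with h | h
  · exact le_of_lt (pvGetD_strict xs hs i j h hj)
  · have : i = j := le_antisymm hij h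
    subst this; exact le_refl _


theorem pvNext_le (xs : List Int) (hs : xs.Pairwise (· < ·)) (a : ℤ) (ha : a ∈ xs) (i : ℕ)
    (hi : i + 1 < xs.length) (h : xs.getD i 0 < a) : xs.getD (i + 1) 0 ≤ a := by
  obtain ⟨k, hk, rfl⟩ := List.mem_iff_getElem.mp ha
  rw [← List.getD_eq_getElem xs 0 hk] at h ⊢
  rcases Nat.lt_or_ge i k with hik | hik
  · exact pvGetD_mono xs hs (i + 1) k hik hk
  · exact absurd (pvGetD_mono xs hs k i hik (by omega)) (by omega)


theorem pvFindCell (xs : List Int) (hs : xs.Pairwise (· < ·)) (x : ℤ)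
    (h1 : ∃ v ∈ xs, v ≤ x) (h2 : ∃ v ∈ xs, x < v) :
    ∃ i : ℕ, i + 1 < xs.length ∧ xs.getD i 0 ≤ x ∧ x < xs.getD (i + 1) 0 := by
  induction xs with
  | nil => simp at h1
  | cons a rest ih =>
    by_cases hr : ∃ v ∈ rest, v ≤ x
    · obtain ⟨v', hv', hxv'⟩ := h2
      have hv'rest : v' ∈ rest := by
        rcases List.mem_cons.mp hv' with rfl | h
        · obtain ⟨v, hv, hvx⟩ := hr
          exact absurd (List.rel_of_pairwise_cons hs hv) (by omega)
        · exact h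
      obtain ⟨i, hilen, hle, hlt⟩ := ih (List.Pairwise.of_cons hs) hr ⟨v', hv'rest, hxv'⟩
      exact ⟨i + 1, by simpa using Nat.succ_lt_succ hilen, by simpa using hle, by simpa using hlt⟩
    · obtain ⟨v, hv, hvx⟩ := h1
      have hva : v = a := by
        rcases List.mem_cons.mp hv with rfl | h
        · rfl
        · exact absurd ⟨v, h, hvx⟩ hr
      subst hva
      obtain ⟨v', hv', hxv'⟩ := h2
      have hv'rest : v' ∈ rest := by
        rcases List.mem_cons.mp hv' with rfl | h
        · omega
        · exact h
      obtain ⟨b, t, rfl⟩ : ∃ b t, rest = b :: t := by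
        cases rest with
        | nil => simp at hv'rest
        | cons b t => exact ⟨b, t, rfl⟩
      refine ⟨0, by simp, hvx, ?_⟩
      simp only [List.getD_cons_succ, List.getD_cons_zero]
      by_contra hbx
      exact hr ⟨b, List.mem_cons_self, by omega⟩


theorem mem_pvBounds (f g : (Int × Int × Int × Int × Int × Int) → Int)
    (L : List (Int × Int × Int × Int × Int × Int)) (v : Int) :
    v ∈ pvBounds f g L ↔ ∃ b ∈ L, v = f b ∨ v = g b + 1 := by
  rw [pvBounds, PySem.List.mem_sorted, PySem.Set.mem_ofList, List.mem_flatMap]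
  simp


theorem pairwise_pvBounds (f g : (Int × Int × Int × Int × Int × Int) → Int)
    (L : List (Int × Int × Int × Int × Int × Int)) :
    (pvBounds f g L).Pairwise (· < ·) :=
  PySem.List.sorted_ofList_pairwise_lt _


theorem pvFoldlIte {α : Type} (l : List α) (c : α → Bool) (e : α → ℤ) (a : ℤ) :
    l.foldl (fun acc k => if c k then acc + e k else acc) a =
      a + (l.map fun k => if c k then e k else 0).sum := by
  induction l generalizing a with
  | nil => simp
  | cons x t ih =>
    rw [List.foldl_cons, List.map_cons, List.sum_cons]
    by_cases h : c x
    · rw [if_pos h, if_pos h, ih]; ring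
    · rw [if_neg h, if_neg h, ih]; ring

theorem pvSumPyRange (m : ℤ) (f : ℤ → ℤ) :
    ((PySem.List.pyRange 0 m 1).map f).sum = ∑ i ∈ Finset.range m.toNat, f i := by
  rw [PySem.List.pyRange_one]
  simp [List.map_map]
  rfl

theorem pvIx_natCast (l : List Int) (n : ℕ) : pvIx l (n : ℤ) = l.getD n 0 := by
  simp [pvIx]

theorem pvIx_natCast_succ (l : List Int) (n : ℕ) : pvIx l ((n : ℤ) + 1) = l.getD (n + 1) 0 := by
  rw [show ((n : ℤ) + 1) = ((n + 1 : ℕ) : ℤ) by push_cast; ring, pvIx_natCast]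

theorem pvAnyCover_iff (L : List (Int × Int × Int × Int × Int × Int)) (x y z : Int) :
    pvAnyCover L x y z = true ↔ ∃ b ∈ L, b.1 ≤ x ∧ x ≤ b.2.1 ∧ b.2.2.1 ≤ y ∧ y ≤ b.2.2.2.1 ∧
      b.2.2.2.2.1 ≤ z ∧ z ≤ b.2.2.2.2.2 := by
  simp [pvAnyCover, List.any_eq_true, and_assoc]

theorem pvCellDisj (ws : List ℤ) (hws : ws.Pairwise (· < ·)) (a b : ℕ) (hab : a ≠ b)
    (ha : a + 1 < ws.length) (hb : b + 1 < ws.length) (v : ℤ)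
    (h1 : ws.getD a 0 ≤ v) (h2 : v < ws.getD (a + 1) 0)
    (h3 : ws.getD b 0 ≤ v) (h4 : v < ws.getD (b + 1) 0) : False := by
  rcases Nat.lt_or_ge a b with h | h
  · have := pvGetD_mono ws hws (a + 1) b h (by omega); omega
  · have := pvGetD_mono ws hws (b + 1) a (by omega) (by omega); omega

-- ==== the compression count equals the cardinality of the union ====

theorem pvCompress (L : List (Int × Int × Int × Int × Int × Int)) :
    (PySem.List.pyRange 0 (((pvBounds (fun b => b.1) (fun b => b.2.1) L).length : Int) - 1) 1).foldl
      (fun acc i =>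
       (PySem.List.pyRange 0 (((pvBounds (fun b => b.2.2.1) (fun b => b.2.2.2.1) L).length : Int) - 1) 1).foldl
         (fun acc j =>
          (PySem.List.pyRange 0 (((pvBounds (fun b => b.2.2.2.2.1) (fun b => b.2.2.2.2.2) L).length : Int) - 1) 1).foldl
            (fun acc k =>
             if pvAnyCover L (pvIx (pvBounds (fun b => b.1) (fun b => b.2.1) L) i)
                 (pvIx (pvBounds (fun b => b.2.2.1) (fun b => b.2.2.2.1) L) j)
                 (pvIx (pvBounds (fun b => b.2.2.2.2.1) (fun b => b.2.2.2.2.2) L) k) then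
               acc + (pvIx (pvBounds (fun b => b.1) (fun b => b.2.1) L) (i + 1) -
                      pvIx (pvBounds (fun b => b.1) (fun b => b.2.1) L) i) *
                 (pvIx (pvBounds (fun b => b.2.2.1) (fun b => b.2.2.2.1) L) (j + 1) -
                  pvIx (pvBounds (fun b => b.2.2.1) (fun b => b.2.2.2.1) L) j) *
                 (pvIx (pvBounds (fun b => b.2.2.2.2.1) (fun b => b.2.2.2.2.2) L) (k + 1) -
                  pvIx (pvBounds (fun b => b.2.2.2.2.1) (fun b => b.2.2.2.2.2) L) k)
             else acc) acc) acc) 0 = ((pvUnion L).card : ℤ) := by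
  set xs := pvBounds (fun b => b.1) (fun b => b.2.1) L with hxs
  set ys := pvBounds (fun b => b.2.2.1) (fun b => b.2.2.2.1) L with hys
  set zs := pvBounds (fun b => b.2.2.2.2.1) (fun b => b.2.2.2.2.2) L with hzs
  have hsx : xs.Pairwise (· < ·) := by rw [hxs]; exact pairwise_pvBounds _ _ _
  have hsy : ys.Pairwise (· < ·) := by rw [hys]; exact pairwise_pvBounds _ _ _
  have hsz : zs.Pairwise (· < ·) := by rw [hzs]; exact pairwise_pvBounds _ _ _
  have hmx : ∀ b ∈ L, b.1 ∈ xs ∧ b.2.1 + 1 ∈ xs := by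
    intro b hb
    rw [hxs]
    exact ⟨(mem_pvBounds _ _ _ _).mpr ⟨b, hb, Or.inl rfl⟩,
      (mem_pvBounds _ _ _ _).mpr ⟨b, hb, Or.inr rfl⟩⟩
  have hmy : ∀ b ∈ L, b.2.2.1 ∈ ys ∧ b.2.2.2.1 + 1 ∈ ys := by
    intro b hb
    rw [hys]
    exact ⟨(mem_pvBounds _ _ _ _).mpr ⟨b, hb, Or.inl rfl⟩,
      (mem_pvBounds _ _ _ _).mpr ⟨b, hb, Or.inr rfl⟩⟩
  have hmz : ∀ b ∈ L, b.2.2.2.2.1 ∈ zs ∧ b.2.2.2.2.2 + 1 ∈ zs := by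
    intro b hb
    rw [hzs]
    exact ⟨(mem_pvBounds _ _ _ _).mpr ⟨b, hb, Or.inl rfl⟩,
      (mem_pvBounds _ _ _ _).mpr ⟨b, hb, Or.inr rfl⟩⟩
  -- a dimension-local helper: locate the cell of a coordinate lying in [lo, hi] with lo, hi+1 grid values
  have hdim : ∀ (ws : List ℤ), ws.Pairwise (· < ·) → ∀ (lo hi x : ℤ), lo ∈ ws → hi + 1 ∈ ws →
      lo ≤ x → x ≤ hi →
      ∃ i : ℕ, i + 1 < ws.length ∧ ws.getD i 0 ≤ x ∧ x < ws.getD (i + 1) 0 ∧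
        lo ≤ ws.getD i 0 ∧ ws.getD i 0 ≤ hi := by
    intro ws hws lo hi x hlo hhi h1 h2
    obtain ⟨i, hilen, hle, hlt⟩ := pvFindCell ws hws x ⟨lo, hlo, h1⟩ ⟨hi + 1, hhi, by omega⟩
    refine ⟨i, hilen, hle, hlt, ?_, by omega⟩
    by_contra hcon
    have := pvNext_le ws hws lo hlo i hilen (by omega)
    omega
  -- and the reverse: the cell of a covered representative stays inside the box
  have hdim2 : ∀ (ws : List ℤ), ws.Pairwise (· < ·) → ∀ (lo hi : ℤ) (i : ℕ), lo ∈ ws →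
      hi + 1 ∈ ws → i + 1 < ws.length → lo ≤ ws.getD i 0 → ws.getD i 0 ≤ hi →
      ws.getD (i + 1) 0 ≤ hi + 1 := by
    intro ws hws lo hi i hlo hhi hlen h1 h2
    exact pvNext_le ws hws (hi + 1) hhi i hlen (by omega)
  -- the triple loop as an iterated sum
  have hLHS :
      (PySem.List.pyRange 0 ((xs.length : Int) - 1) 1).foldl (fun acc i =>
        (PySem.List.pyRange 0 ((ys.length : Int) - 1) 1).foldl (fun acc j =>
          (PySem.List.pyRange 0 ((zs.length : Int) - 1) 1).foldl (fun acc k =>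
            if pvAnyCover L (pvIx xs i) (pvIx ys j) (pvIx zs k) then
              acc + (pvIx xs (i + 1) - pvIx xs i) * (pvIx ys (j + 1) - pvIx ys j) *
                (pvIx zs (k + 1) - pvIx zs k)
            else acc) acc) acc) 0 =
      ∑ i ∈ Finset.range ((xs.length : Int) - 1).toNat,
        ∑ j ∈ Finset.range ((ys.length : Int) - 1).toNat,
          ∑ k ∈ Finset.range ((zs.length : Int) - 1).toNat,
            (if pvAnyCover L (xs.getD i 0) (ys.getD j 0) (zs.getD k 0) then
              (xs.getD (i + 1) 0 - xs.getD i 0) * (ys.getD (j + 1) 0 - ys.getD j 0) *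
                (zs.getD (k + 1) 0 - zs.getD k 0)
            else 0) := by
    have hz : ∀ (i j acc : ℤ),
        (PySem.List.pyRange 0 ((zs.length : Int) - 1) 1).foldl (fun acc k =>
          if pvAnyCover L (pvIx xs i) (pvIx ys j) (pvIx zs k) then
            acc + (pvIx xs (i + 1) - pvIx xs i) * (pvIx ys (j + 1) - pvIx ys j) *
              (pvIx zs (k + 1) - pvIx zs k)
          else acc) acc =
        acc + ((PySem.List.pyRange 0 ((zs.length : Int) - 1) 1).map (fun k =>
          if pvAnyCover L (pvIx xs i) (pvIx ys j) (pvIx zs k) then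
            (pvIx xs (i + 1) - pvIx xs i) * (pvIx ys (j + 1) - pvIx ys j) *
              (pvIx zs (k + 1) - pvIx zs k)
          else 0)).sum := fun i j acc => pvFoldlIte _ _ _ _
    have hy : ∀ (i acc : ℤ),
        (PySem.List.pyRange 0 ((ys.length : Int) - 1) 1).foldl (fun acc j =>
          (PySem.List.pyRange 0 ((zs.length : Int) - 1) 1).foldl (fun acc k =>
            if pvAnyCover L (pvIx xs i) (pvIx ys j) (pvIx zs k) then
              acc + (pvIx xs (i + 1) - pvIx xs i) * (pvIx ys (j + 1) - pvIx ys j) *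
                (pvIx zs (k + 1) - pvIx zs k)
            else acc) acc) acc =
        acc + ((PySem.List.pyRange 0 ((ys.length : Int) - 1) 1).map (fun j =>
          ((PySem.List.pyRange 0 ((zs.length : Int) - 1) 1).map (fun k =>
            if pvAnyCover L (pvIx xs i) (pvIx ys j) (pvIx zs k) then
              (pvIx xs (i + 1) - pvIx xs i) * (pvIx ys (j + 1) - pvIx ys j) *
                (pvIx zs (k + 1) - pvIx zs k)
            else 0)).sum)).sum := by
      intro i acc
      have hfun : (fun (acc : ℤ) (j : ℤ) =>
          (PySem.List.pyRange 0 ((zs.length : Int) - 1) 1).foldl (fun acc k =>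
            if pvAnyCover L (pvIx xs i) (pvIx ys j) (pvIx zs k) then
              acc + (pvIx xs (i + 1) - pvIx xs i) * (pvIx ys (j + 1) - pvIx ys j) *
                (pvIx zs (k + 1) - pvIx zs k)
            else acc) acc) = (fun acc j => acc +
          ((PySem.List.pyRange 0 ((zs.length : Int) - 1) 1).map (fun k =>
            if pvAnyCover L (pvIx xs i) (pvIx ys j) (pvIx zs k) then
              (pvIx xs (i + 1) - pvIx xs i) * (pvIx ys (j + 1) - pvIx ys j) *
                (pvIx zs (k + 1) - pvIx zs k)
            else 0)).sum) := funext fun acc => funext fun j => hz i j acc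
      rw [hfun, PySem.List.foldl_add]
    have hx :
        (PySem.List.pyRange 0 ((xs.length : Int) - 1) 1).foldl (fun acc i =>
          (PySem.List.pyRange 0 ((ys.length : Int) - 1) 1).foldl (fun acc j =>
            (PySem.List.pyRange 0 ((zs.length : Int) - 1) 1).foldl (fun acc k =>
              if pvAnyCover L (pvIx xs i) (pvIx ys j) (pvIx zs k) then
                acc + (pvIx xs (i + 1) - pvIx xs i) * (pvIx ys (j + 1) - pvIx ys j) *
                  (pvIx zs (k + 1) - pvIx zs k)
              else acc) acc) acc) 0 =
        0 + ((PySem.List.pyRange 0 ((xs.length : Int) - 1) 1).map (fun i =>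
          ((PySem.List.pyRange 0 ((ys.length : Int) - 1) 1).map (fun j =>
            ((PySem.List.pyRange 0 ((zs.length : Int) - 1) 1).map (fun k =>
              if pvAnyCover L (pvIx xs i) (pvIx ys j) (pvIx zs k) then
                (pvIx xs (i + 1) - pvIx xs i) * (pvIx ys (j + 1) - pvIx ys j) *
                  (pvIx zs (k + 1) - pvIx zs k)
              else 0)).sum)).sum)).sum := by
      have hfun : (fun (acc : ℤ) (i : ℤ) =>
          (PySem.List.pyRange 0 ((ys.length : Int) - 1) 1).foldl (fun acc j =>
            (PySem.List.pyRange 0 ((zs.length : Int) - 1) 1).foldl (fun acc k =>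
              if pvAnyCover L (pvIx xs i) (pvIx ys j) (pvIx zs k) then
                acc + (pvIx xs (i + 1) - pvIx xs i) * (pvIx ys (j + 1) - pvIx ys j) *
                  (pvIx zs (k + 1) - pvIx zs k)
              else acc) acc) acc) = (fun acc i => acc +
          ((PySem.List.pyRange 0 ((ys.length : Int) - 1) 1).map (fun j =>
            ((PySem.List.pyRange 0 ((zs.length : Int) - 1) 1).map (fun k =>
              if pvAnyCover L (pvIx xs i) (pvIx ys j) (pvIx zs k) then
                (pvIx xs (i + 1) - pvIx xs i) * (pvIx ys (j + 1) - pvIx ys j) *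
                  (pvIx zs (k + 1) - pvIx zs k)
              else 0)).sum)).sum) := funext fun acc => funext fun i => hy i acc
      rw [hfun, PySem.List.foldl_add]
    rw [hx, zero_add, pvSumPyRange]
    refine Finset.sum_congr rfl fun i _ => ?_
    rw [pvSumPyRange]
    refine Finset.sum_congr rfl fun j _ => ?_
    rw [pvSumPyRange]
    refine Finset.sum_congr rfl fun k _ => ?_
    rw [pvIx_natCast, pvIx_natCast, pvIx_natCast, pvIx_natCast_succ, pvIx_natCast_succ,
      pvIx_natCast_succ]
  rw [hLHS]
  -- the union as a disjoint union of covered cell blocks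
  have hT : pvUnion L =
      ((Finset.range ((xs.length : Int) - 1).toNat ×ˢ
        (Finset.range ((ys.length : Int) - 1).toNat ×ˢ
         Finset.range ((zs.length : Int) - 1).toNat)).filter
        (fun t => pvAnyCover L (xs.getD t.1 0) (ys.getD t.2.1 0) (zs.getD t.2.2 0) = true)).biUnion
        (fun t => Finset.Ico (xs.getD t.1 0) (xs.getD (t.1 + 1) 0) ×ˢ
          (Finset.Ico (ys.getD t.2.1 0) (ys.getD (t.2.1 + 1) 0) ×ˢ
           Finset.Ico (zs.getD t.2.2 0) (zs.getD (t.2.2 + 1) 0))) := by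
    apply Finset.Subset.antisymm
    · intro p hp
      obtain ⟨b, hb, hpb⟩ := (mem_pvUnion L p).mp hp
      simp only [pvGrid, Finset.mem_product, Finset.mem_Icc] at hpb
      obtain ⟨⟨hx1, hx2⟩, ⟨hy1, hy2⟩, ⟨hz1, hz2⟩⟩ := hpb
      obtain ⟨i, hi1, hi2, hi3, hi4, hi5⟩ :=
        hdim xs hsx b.1 b.2.1 p.1 (hmx b hb).1 (hmx b hb).2 hx1 hx2
      obtain ⟨j, hj1, hj2, hj3, hj4, hj5⟩ :=
        hdim ys hsy b.2.2.1 b.2.2.2.1 p.2.1 (hmy b hb).1 (hmy b hb).2 hy1 hy2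
      obtain ⟨k, hk1, hk2, hk3, hk4, hk5⟩ :=
        hdim zs hsz b.2.2.2.2.1 b.2.2.2.2.2 p.2.2 (hmz b hb).1 (hmz b hb).2 hz1 hz2
      rw [Finset.mem_biUnion]
      refine ⟨(i, j, k), ?_, ?_⟩
      · rw [Finset.mem_filter]
        refine ⟨?_, ?_⟩
        · simp only [Finset.mem_product, Finset.mem_range]
          exact ⟨by omega, by omega, by omega⟩
        · rw [pvAnyCover_iff]
          exact ⟨b, hb, hi4, hi5, hj4, hj5, hk4, hk5⟩
      · simp only [Finset.mem_product, Finset.mem_Ico]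
        exact ⟨⟨hi2, hi3⟩, ⟨hj2, hj3⟩, ⟨hk2, hk3⟩⟩
    · intro p hp
      rw [Finset.mem_biUnion] at hp
      obtain ⟨t, ht, hpt⟩ := hp
      rw [Finset.mem_filter] at ht
      obtain ⟨htT, htcov⟩ := ht
      simp only [Finset.mem_product, Finset.mem_range] at htT
      obtain ⟨hti, htj, htk⟩ := htT
      rw [pvAnyCover_iff] at htcov
      obtain ⟨b, hb, hc1, hc2, hc3, hc4, hc5, hc6⟩ := htcov
      simp only [Finset.mem_product, Finset.mem_Ico] at hpt
      obtain ⟨⟨hp1, hp2⟩, ⟨hp3, hp4⟩, ⟨hp5, hp6⟩⟩ := hpt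
      rw [mem_pvUnion]
      refine ⟨b, hb, ?_⟩
      simp only [pvGrid, Finset.mem_product, Finset.mem_Icc]
      have e1 := hdim2 xs hsx b.1 b.2.1 t.1 (hmx b hb).1 (hmx b hb).2 (by omega) hc1 hc2
      have e2 := hdim2 ys hsy b.2.2.1 b.2.2.2.1 t.2.1 (hmy b hb).1 (hmy b hb).2 (by omega) hc3 hc4
      have e3 := hdim2 zs hsz b.2.2.2.2.1 b.2.2.2.2.2 t.2.2 (hmz b hb).1 (hmz b hb).2 (by omega) hc5 hc6
      exact ⟨⟨by omega, by omega⟩, ⟨by omega, by omega⟩, ⟨by omega, by omega⟩⟩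
  have hdisj : ∀ t1 ∈ (Finset.range ((xs.length : Int) - 1).toNat ×ˢ
        (Finset.range ((ys.length : Int) - 1).toNat ×ˢ
         Finset.range ((zs.length : Int) - 1).toNat)).filter
        (fun t => pvAnyCover L (xs.getD t.1 0) (ys.getD t.2.1 0) (zs.getD t.2.2 0) = true),
      ∀ t2 ∈ (Finset.range ((xs.length : Int) - 1).toNat ×ˢ
        (Finset.range ((ys.length : Int) - 1).toNat ×ˢ
         Finset.range ((zs.length : Int) - 1).toNat)).filter
        (fun t => pvAnyCover L (xs.getD t.1 0) (ys.getD t.2.1 0) (zs.getD t.2.2 0) = true),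
      t1 ≠ t2 →
      Disjoint
        (Finset.Ico (xs.getD t1.1 0) (xs.getD (t1.1 + 1) 0) ×ˢ
          (Finset.Ico (ys.getD t1.2.1 0) (ys.getD (t1.2.1 + 1) 0) ×ˢ
           Finset.Ico (zs.getD t1.2.2 0) (zs.getD (t1.2.2 + 1) 0)))
        (Finset.Ico (xs.getD t2.1 0) (xs.getD (t2.1 + 1) 0) ×ˢ
          (Finset.Ico (ys.getD t2.2.1 0) (ys.getD (t2.2.1 + 1) 0) ×ˢ
           Finset.Ico (zs.getD t2.2.2 0) (zs.getD (t2.2.2 + 1) 0))) := by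
    intro t1 ht1 t2 ht2 hne
    rw [Finset.mem_filter] at ht1 ht2
    simp only [Finset.mem_product, Finset.mem_range] at ht1 ht2
    obtain ⟨⟨ha1, ha2, ha3⟩, -⟩ := ht1
    obtain ⟨⟨hb1, hb2, hb3⟩, -⟩ := ht2
    rw [Finset.disjoint_left]
    intro p hp1 hp2
    simp only [Finset.mem_product, Finset.mem_Ico] at hp1 hp2
    obtain ⟨⟨u1, u2⟩, ⟨u3, u4⟩, ⟨u5, u6⟩⟩ := hp1
    obtain ⟨⟨v1, v2⟩, ⟨v3, v4⟩, ⟨v5, v6⟩⟩ := hp2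
    by_cases e1 : t1.1 = t2.1
    · by_cases e2 : t1.2.1 = t2.2.1
      · by_cases e3 : t1.2.2 = t2.2.2
        · exact hne (Prod.ext e1 (Prod.ext e2 e3))
        · exact pvCellDisj zs hsz t1.2.2 t2.2.2 e3 (by omega) (by omega) p.2.2 u5 u6 v5 v6
      · exact pvCellDisj ys hsy t1.2.1 t2.2.1 e2 (by omega) (by omega) p.2.1 u3 u4 v3 v4
    · exact pvCellDisj xs hsx t1.1 t2.1 e1 (by omega) (by omega) p.1 u1 u2 v1 v2
  rw [hT, Finset.card_biUnion hdisj]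
  push_cast
  rw [Finset.sum_filter, Finset.sum_product]
  refine Finset.sum_congr rfl fun i hi => ?_
  rw [Finset.sum_product]
  refine Finset.sum_congr rfl fun j hj => ?_
  refine Finset.sum_congr rfl fun k hk => ?_
  rw [Finset.mem_range] at hi hj hk
  by_cases hc : pvAnyCover L (xs.getD i 0) (ys.getD j 0) (zs.getD k 0) = true
  · rw [if_pos hc, if_pos hc]
    rw [Finset.card_product, Finset.card_product, Int.card_Ico, Int.card_Ico, Int.card_Ico]
    have w1 := pvGetD_strict xs hsx i (i + 1) (by omega) (by omega)
    have w2 := pvGetD_strict ys hsy j (j + 1) (by omega) (by omega)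
    have w3 := pvGetD_strict zs hsz k (k + 1) (by omega) (by omega)
    push_cast
    rw [Int.toNat_of_nonneg (by omega), Int.toNat_of_nonneg (by omega),
      Int.toNat_of_nonneg (by omega)]
    ring
  · rw [if_neg hc, if_neg hc]



-- ===== VERDICT (by name: the statement is the Claim_ definition above) =====
theorem count_uninterrupted_spec : Claim_equal_count_uninterrupted := by
  intro item rest _hdom _hpre
  unfold Spec_count_uninterrupted
  have hA := (pvMain rest.length).1 item rest le_rfl
  have hB : count_uninterrupted_alt item rest =
      (item.2.1.length : ℤ) * (item.2.2.1.length : ℤ) * (item.2.2.2.length : ℤ) -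
        ((pvUnion (pvClip item.2.1 item.2.2.1 item.2.2.2 rest)).card : ℤ) := by
    simp only [count_uninterrupted_alt]
    rw [pvCompress (pvClip item.2.1 item.2.2.1 item.2.2.2 rest)]
  rw [hA, hB, buildConflicts_map_eq_clip]
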